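-- pv_equiv track=rewrite | github.com/jiwonsong-dev/RelayGen | prob_margin_profile.py | compute_cue_segments
-- ===== SOURCE A (Python) =====
-- def compute_cue_segments(tokens, margins, cues):
--     end_markers = [".", "!", "?", "\n"]
--     n = len(tokens)
--
--     cue_margins = {c: [] for c in cues}
--     cue_counts = {c: 0 for c in cues}
--
--     overall_margins = margins
--
--     for i, tok in enumerate(tokens):
--         ts = tok if isinstance(tok, str) else str(tok)
--         t_clean = ts.strip()
--         matched_cue = None
--         start = None
--
--         # Generic multi-token handling for cues ending with ',' or ' '
--         next_clean = None
--         if (i + 1) < n: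
--             next_tok = tokens[i + 1]
--             next_clean = (next_tok if isinstance(next_tok, str) else str(next_tok)).strip()
--         if matched_cue is None:
--             for cue in cues:
--                 if cue.endswith(","):
--                     base = cue[:-1]
--                     if (t_clean == base) or ts.startswith(" " + base):
--                         if next_clean == ",":
--                             matched_cue = cue
--                             start = i + 2
--                             break
--                 elif cue.endswith(" "):
--                     base = cue.rstrip()
--                     if (t_clean == base) or ts.startswith(" " + base):
--                         matched_cue = cue
--                         start = i + 1
--                         break
--
--         # General case-sensitive matching for all other cues
--         if matched_cue is None:
--             for cue in cues:
--                 c = cue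
--                 if not c.strip():
--                     continue
--                 if (c in t_clean) or (t_clean == c) or (ts == c):
--                     matched_cue = cue
--                     start = i + 1
--                     break
--
--         if matched_cue:
--             start = (start if start is not None else i + 1)
--
--             end = start
--             while end < n:
--                 t = tokens[end]
--                 tt = t.strip() if isinstance(t, str) else str(t)
--                 if any(em in tt for em in end_markers):
--                     break
--                 end += 1
--
--             if start < end:
--                 segment_margins = margins[start:end]
--                 if segment_margins:
--                     cue_margins[matched_cue].extend(segment_margins)
--                     cue_counts[matched_cue] += 1
--
--     return cue_margins, cue_counts
-- ===== SOURCE B (Python) =====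
-- def compute_cue_segments(tokens, margins, cues):
--     end_markers = (".", "!", "?", "\n")
--     toks = [t if isinstance(t, str) else str(t) for t in tokens]
--     n = len(toks)
--
--     # one backward pass: next_end[j] = first index >= j whose stripped token
--     # contains an end marker, else n
--     next_end = [n] * (n + 1)
--     for j in range(n - 1, -1, -1):
--         tt = toks[j].strip()
--         next_end[j] = j if any(em in tt for em in end_markers) else next_end[j + 1]
--
--     def multi_ok(i, cue):
--         base = cue[:-1] if cue.endswith(",") else cue.rstrip()
--         if not (toks[i].strip() == base or toks[i].startswith(" " + base)):
--             return False
--         if cue.endswith(","):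
--             return i + 1 < n and toks[i + 1].strip() == ","
--         return cue.endswith(" ")
--
--     def plain_ok(i, cue):
--         tc = toks[i].strip()
--         return bool(cue.strip()) and (cue in tc or tc == cue or toks[i] == cue)
--
--     def event(i):
--         cue = next((c for c in cues if multi_ok(i, c)), None)
--         if cue is not None:
--             start = i + 2 if cue.endswith(",") else i + 1
--         else:
--             cue = next((c for c in cues if plain_ok(i, c)), None)
--             start = i + 1
--         if cue is None:
--             return None
--         seg = margins[start:next_end[start]] if start <= n else []
--         return (cue, seg) if seg else None
--
--     events = [e for e in map(event, range(n)) if e is not None]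
--     cue_margins = {c: [m for cue, seg in events if cue == c for m in seg] for c in cues}
--     cue_counts = {c: sum(1 for cue, _ in events if cue == c) for c in cues}
--     return cue_margins, cue_counts
-- ===== Notes on version B (the rewrite author's own statement) =====
-- stated objective: alternative
-- what changed: B precomputes the next end-marker index for every position in one backward pass (replacing A's inner forward while-scan), expresses A's two hand-rolled cue-matching loops as two next()/predicate searches, builds a flat event list in one pass and then groups it per cue with dict comprehensions instead of A's in-place dict mutation.
import Mathlib
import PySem

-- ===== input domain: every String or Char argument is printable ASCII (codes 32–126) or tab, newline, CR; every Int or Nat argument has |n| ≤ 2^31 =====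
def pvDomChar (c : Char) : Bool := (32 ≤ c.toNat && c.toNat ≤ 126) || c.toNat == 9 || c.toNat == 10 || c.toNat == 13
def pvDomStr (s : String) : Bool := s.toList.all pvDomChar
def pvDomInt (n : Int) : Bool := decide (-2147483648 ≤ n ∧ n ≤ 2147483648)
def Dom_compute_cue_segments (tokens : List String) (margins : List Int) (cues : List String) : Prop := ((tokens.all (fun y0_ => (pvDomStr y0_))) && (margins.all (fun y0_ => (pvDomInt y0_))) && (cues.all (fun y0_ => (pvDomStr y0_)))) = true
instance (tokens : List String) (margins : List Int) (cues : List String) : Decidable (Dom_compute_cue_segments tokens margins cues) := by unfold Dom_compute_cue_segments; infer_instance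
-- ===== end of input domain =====

-- B precomputes next-end-marker indices in one backward pass (replacing A's inner
-- forward while-scan), expresses cue matching as two find? predicates instead of A's
-- hand-rolled loops, and builds the result dicts by grouping a flat event list per
-- cue instead of A's in-place dict mutation (objective: alternative).

-- ===== PORT A =====
-- end_markers = [".", "!", "?", "\n"]; any(em in tok.strip() for em in end_markers)
def pvEndMarkers : List String := [".", "!", "?", "\n"]

def pvIsEnd (tok : String) : Bool :=
  pvEndMarkers.any (fun em => PySem.Str.isIn em (PySem.Str.strip tok))

-- A's first for-loop over cues (multi-token cues ending with ',' or ' '); returns (cue, start)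
def pvLoop1 (ts t_clean : String) (next_clean : Option String) (i : Int) : List String → Option (String × Int)
  | [] => none
  | cue :: rest =>
    if PySem.Str.endswith cue "," then
      if t_clean == PySem.Str.slice cue none (some (-1)) ||
          PySem.Str.startswith ts (" " ++ PySem.Str.slice cue none (some (-1))) then
        if next_clean == some "," then some (cue, i + 2)
        else pvLoop1 ts t_clean next_clean i rest
      else pvLoop1 ts t_clean next_clean i rest
    else if PySem.Str.endswith cue " " then
      if t_clean == PySem.Str.rstrip cue ||
          PySem.Str.startswith ts (" " ++ PySem.Str.rstrip cue) then some (cue, i + 1)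
      else pvLoop1 ts t_clean next_clean i rest
    else pvLoop1 ts t_clean next_clean i rest

-- A's second for-loop over cues (general case-sensitive matching)
def pvLoop2 (ts t_clean : String) (i : Int) : List String → Option (String × Int)
  | [] => none
  | cue :: rest =>
    if PySem.Str.strip cue == "" then pvLoop2 ts t_clean i rest
    else if PySem.Str.isIn cue t_clean || t_clean == cue || ts == cue then some (cue, i + 1)
    else pvLoop2 ts t_clean i rest

-- A's two matching loops in order ('if matched_cue is None' chaining)
def pvMatch (cues : List String) (ts : String) (next_clean : Option String) (i : Int) : Option (String × Int) :=
  match pvLoop1 ts (PySem.Str.strip ts) next_clean i cues with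
  | some r => some r
  | none => pvLoop2 ts (PySem.Str.strip ts) i cues

-- A's inner 'while end < n: … end += 1' scan
def pvWhileEnd (tokens : List String) (n e : Int) : Int :=
  if h : e < n then
    if pvIsEnd (PySem.List.pyGetD tokens e "") then e
    else pvWhileEnd tokens n (e + 1)
  else e
termination_by (n - e).toNat
decreasing_by omega

-- A's loop body for one (i, tok) of enumerate(tokens)
def pvStepA (tokens : List String) (margins : List Int) (cues : List String)
    (st : PySem.Dict String (List Int) × PySem.Dict String Int) (p : Int × String) :
    PySem.Dict String (List Int) × PySem.Dict String Int :=
  let n : Int := tokens.length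
  let ts := p.2
  let next_clean : Option String :=
    if p.1 + 1 < n then some (PySem.Str.strip (PySem.List.pyGetD tokens (p.1 + 1) "")) else none
  match pvMatch cues ts next_clean p.1 with
  | none => st
  | some (cue, start) =>
    let e := pvWhileEnd tokens n start
    if start < e then
      let seg := PySem.List.slice margins (some start) (some e)
      if seg.isEmpty then st
      else (st.1.modify cue [] (· ++ seg), st.2.modify cue 0 (· + 1))
    else st

def compute_cue_segments (tokens : List String) (margins : List Int) (cues : List String) : (List (String × List Int)) × (List (String × Int)) :=
  let cue_margins : PySem.Dict String (List Int) := cues.foldl (fun d c => d.insert c []) PySem.Dict.empty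
  let cue_counts : PySem.Dict String Int := cues.foldl (fun d c => d.insert c 0) PySem.Dict.empty
  let st := (PySem.List.enumerate tokens).foldl (pvStepA tokens margins cues) (cue_margins, cue_counts)
  (st.1.items, st.2.items)

-- ===== PORT B =====
-- backward pass: element j is the first index ≥ j whose stripped token contains an
-- end marker, or n; built right-to-left as Source B's backward loop fills next_end[j] from next_end[j+1]
def pvNextEnds : List String → Int → List Int
  | [], i => [i]
  | t :: rest, i =>
    let tail := pvNextEnds rest (i + 1)
    (if pvIsEnd t then i else tail.headD (i + 1)) :: tail

-- Source B's multi_ok(i, cue)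
def pvMultiOk (tokens : List String) (n i : Int) (cue : String) : Bool :=
  let base := if PySem.Str.endswith cue "," then PySem.Str.slice cue none (some (-1))
              else PySem.Str.rstrip cue
  let ts := PySem.List.pyGetD tokens i ""
  if !(PySem.Str.strip ts == base || PySem.Str.startswith ts (" " ++ base)) then false
  else if PySem.Str.endswith cue "," then
    decide (i + 1 < n) && (PySem.Str.strip (PySem.List.pyGetD tokens (i + 1) "") == ",")
  else PySem.Str.endswith cue " "

-- Source B's plain_ok(i, cue)
def pvPlainOk (tokens : List String) (i : Int) (cue : String) : Bool :=
  let ts := PySem.List.pyGetD tokens i ""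
  let tc := PySem.Str.strip ts
  (PySem.Str.strip cue != "") && (PySem.Str.isIn cue tc || tc == cue || ts == cue)

-- Source B's event(i): the matched cue (first multi_ok cue, else first plain_ok cue) with
-- its non-empty margin segment, obtained from the precomputed next_end table
def pvEvent (tokens : List String) (margins : List Int) (cues : List String)
    (ne : List Int) (n i : Int) : Option (String × List Int) :=
  let m : Option (String × Int) :=
    match cues.find? (pvMultiOk tokens n i) with
    | some cue => some (cue, if PySem.Str.endswith cue "," then i + 2 else i + 1)
    | none =>
      match cues.find? (pvPlainOk tokens i) with
      | some cue => some (cue, i + 1)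
      | none => none
  match m with
  | none => none
  | some (cue, start) =>
    let seg := if start ≤ n then
        PySem.List.slice margins (some start) (some (PySem.List.pyGetD ne start 0))
      else []
    if seg.isEmpty then none else some (cue, seg)

def compute_cue_segments_alt (tokens : List String) (margins : List Int) (cues : List String) : (List (String × List Int)) × (List (String × Int)) :=
  let n : Int := tokens.length
  let ne := pvNextEnds tokens 0
  let events := (PySem.List.pyRange 0 n 1).filterMap (pvEvent tokens margins cues ne n)
  let cue_margins : PySem.Dict String (List Int) :=
    cues.foldl (fun d c => d.insert c ((events.filter (fun e => e.1 == c)).flatMap (·.2))) PySem.Dict.empty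
  let cue_counts : PySem.Dict String Int :=
    cues.foldl (fun d c => d.insert c ((events.filter (fun e => e.1 == c)).length : Int)) PySem.Dict.empty
  (cue_margins.items, cue_counts.items)

-- ===== PRECONDITION & SPEC =====
def Spec_compute_cue_segments (tokens : List String) (margins : List Int) (cues : List String) (out : (List (String × List Int)) × (List (String × Int))) : Prop := out = compute_cue_segments_alt tokens margins cues
instance (tokens : List String) (margins : List Int) (cues : List String) (out : (List (String × List Int)) × (List (String × Int))) : Decidable (Spec_compute_cue_segments tokens margins cues out) := by unfold Spec_compute_cue_segments; infer_instance

-- ===== CLAIM (what is proved, stated in full; the proofs are below) =====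
def Claim_equal_compute_cue_segments : Prop := ∀ (tokens : List String) (margins : List Int) (cues : List String), Dom_compute_cue_segments tokens margins cues → Spec_compute_cue_segments tokens margins cues (compute_cue_segments tokens margins cues)

-- ===== LEMMAS AND PROOFS =====

-- number of leading tokens without an end marker
def pvFirstEnd : List String → Nat
  | [] => 0
  | t :: r => if pvIsEnd t then 0 else pvFirstEnd r + 1

theorem pvWhileEnd_eq (tokens : List String) (k : Nat) :
    pvWhileEnd tokens tokens.length (k : Int) = (k : Int) + pvFirstEnd (tokens.drop k) := by
  induction h : tokens.length - k generalizing k with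
  | zero =>
    rw [pvWhileEnd, dif_neg (by omega)]
    rw [List.drop_eq_nil_of_le (by omega)]
    simp [pvFirstEnd]
  | succ m ih =>
    have hk : k < tokens.length := by omega
    rw [pvWhileEnd, dif_pos (by exact_mod_cast (by omega : (k:Int) < tokens.length))]
    rw [PySem.List.pyGetD_natCast, List.getD_eq_getElem _ _ hk, List.drop_eq_getElem_cons hk]
    by_cases he : pvIsEnd tokens[k]
    · simp [he, pvFirstEnd]
    · have hc : ((k : Int) + 1) = ((k + 1 : Nat) : Int) := by push_cast; ring
      rw [if_neg he, hc, ih (k + 1) (by omega)]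
      simp only [pvFirstEnd, if_neg he]
      push_cast
      ring

theorem pvNextEnds_ne_nil (ts : List String) (i : Int) : pvNextEnds ts i ≠ [] := by
  cases ts <;> simp [pvNextEnds]

theorem pvNextEnds_getD (ts : List String) (i : Int) (k : Nat) (hk : k ≤ ts.length) :
    PySem.List.pyGetD (pvNextEnds ts i) (k : Int) 0 = i + k + pvFirstEnd (ts.drop k) := by
  induction ts generalizing i k with
  | nil =>
    have hk0 : k = 0 := Nat.le_zero.mp hk
    subst hk0
    simp [pvNextEnds, pvFirstEnd]
  | cons t r ih =>
    rw [PySem.List.pyGetD_natCast]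
    cases k with
    | zero =>
      simp only [pvNextEnds, List.getD_cons_zero, List.drop_zero]
      by_cases he : pvIsEnd t
      · simp [he, pvFirstEnd]
      · have h0 := ih (i + 1) 0 (by omega)
        rw [PySem.List.pyGetD_natCast] at h0
        have hne := pvNextEnds_ne_nil r (i + 1)
        have hh : (pvNextEnds r (i + 1)).headD (i + 1) = (pvNextEnds r (i + 1)).getD 0 0 := by
          cases hx : pvNextEnds r (i + 1) with
          | nil => exact absurd hx hne
          | cons a l => simp
        rw [if_neg he, hh, h0]
        simp only [pvFirstEnd, if_neg he, List.drop_zero]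
        push_cast
        ring
    | succ k =>
      have hkk := ih (i + 1) k (by simpa using hk)
      rw [PySem.List.pyGetD_natCast] at hkk
      simp only [pvNextEnds, List.getD_cons_succ, List.drop_succ_cons]
      rw [hkk]
      push_cast
      ring


theorem pvLoop1_eq (tokens : List String) (n i : Int) (cues : List String) :
    pvLoop1 (PySem.List.pyGetD tokens i "") (PySem.Str.strip (PySem.List.pyGetD tokens i ""))
        (if i + 1 < n then some (PySem.Str.strip (PySem.List.pyGetD tokens (i + 1) "")) else none) i cues =
      (cues.find? (pvMultiOk tokens n i)).map
        (fun cue => (cue, if PySem.Str.endswith cue "," then i + 2 else i + 1)) := by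
  induction cues with
  | nil => rfl
  | cons c rest ih =>
    rw [pvLoop1, List.find?_cons]
    by_cases h1 : PySem.Str.endswith c "," = true
    · have h1' : PySem.Chars.endswith c.toList [','] = true := by simpa using h1
      by_cases hb : (PySem.Str.strip (PySem.List.pyGetD tokens i "") == PySem.Str.slice c none (some (-1)) ||
          PySem.Str.startswith (PySem.List.pyGetD tokens i "") (" " ++ PySem.Str.slice c none (some (-1)))) = true
      · have hb' := hb
        simp at hb'
        by_cases hnc : ((if i + 1 < n then some (PySem.Str.strip (PySem.List.pyGetD tokens (i + 1) "")) else none) == some (",":String)) = true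
        · have hlt : i + 1 < n := by
            by_contra hx
            simp [hx] at hnc
          have hstr : PySem.Str.strip (PySem.List.pyGetD tokens (i + 1) "") = (",":String) := by
            rw [if_pos hlt] at hnc
            simpa using hnc
          have hm : pvMultiOk tokens n i c = true := by
            simp [pvMultiOk, h1', hlt, hstr]
            exact hb'
          simp [hm, h1', hb', hlt, hstr]
        · have hnc' := hnc
          simp at hnc'
          have hm : pvMultiOk tokens n i c = false := by
            by_cases hlt : i + 1 < n
            · have hs := hnc' hlt
              simp [pvMultiOk, h1', hlt, hs]
            · simp [pvMultiOk, h1', hlt]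
          simp [hm, h1', hb', ih]
          intro hlt hs
          exact absurd hs (hnc' hlt)
      · have hb' := hb
        simp at hb'
        have hm : pvMultiOk tokens n i c = false := by
          simp [pvMultiOk, h1', hb']
        simp [hm, h1', hb', ih]
    · have h1' : PySem.Chars.endswith c.toList [','] = false := by
        simpa using h1
      by_cases h2 : PySem.Str.endswith c " " = true
      · have h2' : PySem.Chars.endswith c.toList [' '] = true := by simpa using h2
        by_cases hb : (PySem.Str.strip (PySem.List.pyGetD tokens i "") == PySem.Str.rstrip c ||
            PySem.Str.startswith (PySem.List.pyGetD tokens i "") (" " ++ PySem.Str.rstrip c)) = true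
        · have hb' := hb
          simp at hb'
          have hm : pvMultiOk tokens n i c = true := by
            simp [pvMultiOk, h1', h2']
            exact hb'
          simp [hm, h1', h2', hb']
        · have hb' := hb
          simp at hb'
          have hm : pvMultiOk tokens n i c = false := by
            simp [pvMultiOk, h1', hb']
          simp [hm, h1', h2', hb', ih]
      · have h2' : PySem.Chars.endswith c.toList [' '] = false := by
          simpa using h2
        have hm : pvMultiOk tokens n i c = false := by
          simp [pvMultiOk, h1', h2']
        simp [hm, h1', h2', ih]

theorem pvLoop2_eq (tokens : List String) (i : Int) (cues : List String) :
    pvLoop2 (PySem.List.pyGetD tokens i "") (PySem.Str.strip (PySem.List.pyGetD tokens i "")) i cues =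
      (cues.find? (pvPlainOk tokens i)).map (fun cue => (cue, i + 1)) := by
  induction cues with
  | nil => rfl
  | cons c rest ih =>
    rw [pvLoop2, List.find?_cons]
    by_cases h1 : (PySem.Str.strip c == ("":String)) = true
    · have h1' := h1
      simp at h1'
      have hm : pvPlainOk tokens i c = false := by
        simp [pvPlainOk, h1']
      simp [hm, h1', ih]
    · have h1' := h1
      simp at h1'
      by_cases h2 : (PySem.Str.isIn c (PySem.Str.strip (PySem.List.pyGetD tokens i "")) ||
          PySem.Str.strip (PySem.List.pyGetD tokens i "") == c ||
          PySem.List.pyGetD tokens i "" == c) = true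
      · have h2' := h2
        simp at h2'
        have hm : pvPlainOk tokens i c = true := by
          simp [pvPlainOk, h1', h2']
        simp [hm, h1', h2']
      · have h2' := h2
        simp at h2'
        have hm : pvPlainOk tokens i c = false := by
          simp [pvPlainOk, h1', h2']
        simp [hm, h1', h2', ih]

-- A's end-scan-and-update tail equals B's slice against the precomputed table
theorem pvTail_eq (tokens : List String) (margins : List Int)
    (st : PySem.Dict String (List Int) × PySem.Dict String Int) (cue : String) (start : Int)
    (h0 : 0 ≤ start) :
    (if start < pvWhileEnd tokens (tokens.length : Int) start then
       if (PySem.List.slice margins (some start) (some (pvWhileEnd tokens (tokens.length : Int) start))).isEmpty then st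
       else (st.1.modify cue [] (· ++ PySem.List.slice margins (some start) (some (pvWhileEnd tokens (tokens.length : Int) start))),
             st.2.modify cue 0 (· + 1))
     else st) =
    (if (if start ≤ (tokens.length : Int) then
           PySem.List.slice margins (some start) (some (PySem.List.pyGetD (pvNextEnds tokens 0) start 0))
         else []).isEmpty then st
     else (st.1.modify cue [] (· ++ (if start ≤ (tokens.length : Int) then
             PySem.List.slice margins (some start) (some (PySem.List.pyGetD (pvNextEnds tokens 0) start 0)) else [])),
           st.2.modify cue 0 (· + 1))) := by
  by_cases hle : start ≤ (tokens.length : Int)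
  · obtain ⟨s, rfl⟩ : ∃ s : Nat, start = (s : Int) := ⟨start.toNat, by omega⟩
    have hs : s ≤ tokens.length := by exact_mod_cast hle
    rw [if_pos hle, pvNextEnds_getD tokens 0 s hs, pvWhileEnd_eq tokens s, zero_add]
    by_cases hF : pvFirstEnd (tokens.drop s) = 0
    · rw [hF]
      have hlt : ¬ ((s : Int) < (s : Int) + (0 : Nat)) := by omega
      rw [if_neg (by push_cast; omega)]
      have : PySem.List.slice margins (some (s : Int)) (some ((s : Int) + ((0:Nat) : Int))) = [] := by
        rw [PySem.List.slice_natCast_add]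
        simp
      rw [this]
      simp
    · rw [if_pos (by omega)]
  · rw [if_neg hle]
    have he : pvWhileEnd tokens (tokens.length : Int) start = start := by
      rw [pvWhileEnd, dif_neg (by omega)]
    rw [he, if_neg (by omega)]
    simp

-- reducing an Option.elim over pvEvent's guarded if
theorem opt_elim_ite {A B : Type} (p : Prop) [Decidable p] (x : A) (st : B) (f : A -> B) :
    (if p then none else some x).elim st f = if p then st else f x := by
  split_ifs <;> rfl

-- the two dict updates performed for one event
def pvUpd (st : PySem.Dict String (List Int) × PySem.Dict String Int) (y : String × List Int) :
    PySem.Dict String (List Int) × PySem.Dict String Int :=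
  (st.1.modify y.1 [] (· ++ y.2), st.2.modify y.1 0 (· + 1))

-- A's loop body equals B's event applied through the modify updates
theorem pvStep_eq_event (tokens : List String) (margins : List Int) (cues : List String)
    (st : PySem.Dict String (List Int) × PySem.Dict String Int) (i : Int)
    (h0 : 0 ≤ i) (_hn : i < tokens.length) :
    pvStepA tokens margins cues st (i, PySem.List.pyGetD tokens i "") =
      (pvEvent tokens margins cues (pvNextEnds tokens 0) (tokens.length : Int) i).elim st
        (pvUpd st) := by
  simp only [pvStepA, pvMatch, pvUpd]
  rw [pvLoop1_eq tokens (tokens.length : Int) i cues]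
  cases hf1 : cues.find? (pvMultiOk tokens (tokens.length : Int) i) with
  | some cue =>
    have hT := pvTail_eq tokens margins st cue (if PySem.Str.endswith cue "," then i + 2 else i + 1)
      (by split_ifs <;> omega)
    simpa [pvEvent, hf1, opt_elim_ite] using hT
  | none =>
    rw [pvLoop2_eq tokens i cues]
    cases hf2 : cues.find? (pvPlainOk tokens i) with
    | some cue =>
      have hT := pvTail_eq tokens margins st cue (i + 1) (by omega)
      simpa [pvEvent, hf1, hf2, opt_elim_ite] using hT
    | none => simp [pvEvent, hf1, hf2]

-- fold with an option-producing step = fold over the filterMap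
theorem foldl_elim_filterMap {α β γ : Type} (l : List α) (h : α → Option β)
    (g : γ → β → γ) (init : γ) :
    l.foldl (fun acc x => (h x).elim acc (g acc)) init = (l.filterMap h).foldl g init := by
  induction l generalizing init with
  | nil => rfl
  | cons a l ih =>
    simp only [List.foldl_cons, List.filterMap_cons]
    cases h a <;> simp [ih]

-- every produced event carries a cue from the cue list
theorem mem_events_cue (tokens : List String) (margins : List Int) (cues : List String)
    (ne : List Int) (n i : Int) (p : String × List Int)
    (h : pvEvent tokens margins cues ne n i = some p) : p.1 ∈ cues := by
  unfold pvEvent at h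
  cases hf1 : cues.find? (pvMultiOk tokens n i) with
  | some cue =>
    rw [hf1] at h
    simp only at h
    split_ifs at h
    all_goals (cases h) <;> exact List.mem_of_find?_eq_some hf1
  | none =>
    rw [hf1] at h
    cases hf2 : cues.find? (pvPlainOk tokens i) with
    | some cue =>
      rw [hf2] at h
      simp only at h
      split_ifs at h
      all_goals (cases h) <;> exact List.mem_of_find?_eq_some hf2
    | none =>
      rw [hf2] at h
      cases h

-- getD of a grouping fold with list-append modify
theorem getD_foldl_modify_append_list {κ : Type} [BEq κ] [LawfulBEq κ]
    (l : List (κ × List Int)) (d : PySem.Dict κ (List Int)) (c : κ) :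
    (l.foldl (fun d p => d.modify p.1 [] (· ++ p.2)) d).getD c [] =
      d.getD c [] ++ (l.filter (fun p => p.1 == c)).flatMap (·.2) := by
  induction l generalizing d with
  | nil => simp
  | cons a l ih =>
    simp only [List.foldl_cons, List.filter_cons, ih]
    by_cases hc : a.1 = c
    · simp [hc, PySem.Dict.getD_modify_self]
    · rw [if_neg (by simpa using hc), PySem.Dict.getD_modify_of_ne]
      exact fun he => hc he.symm

-- getD of a counting fold keyed by the first component
theorem getD_foldl_modify_count {κ : Type} [BEq κ] [LawfulBEq κ]
    (l : List (κ × List Int)) (d : PySem.Dict κ Int) (c : κ) :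
    (l.foldl (fun d p => d.modify p.1 0 (· + 1)) d).getD c 0 =
      d.getD c 0 + ((l.filter (fun p => p.1 == c)).length : Int) := by
  induction l generalizing d with
  | nil => simp
  | cons a l ih =>
    simp only [List.foldl_cons, List.filter_cons, ih]
    by_cases hc : a.1 = c
    · rw [if_pos (by simpa using hc), hc, PySem.Dict.getD_modify_self]
      simp only [List.length_cons]
      push_cast
      ring
    · rw [if_neg (by simpa using hc), PySem.Dict.getD_modify_of_ne]
      exact fun he => hc he.symm

-- getD of a fold of inserts with key-determined values
theorem getD_foldl_insert_fun {κ ν : Type} [BEq κ] [LawfulBEq κ] [DecidableEq κ]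
    (l : List κ) (v : κ → ν) (d : PySem.Dict κ ν) (c : κ) (d0 : ν) :
    (l.foldl (fun d c => d.insert c (v c)) d).getD c d0 =
      if c ∈ l then v c else d.getD c d0 := by
  induction l generalizing d with
  | nil => simp
  | cons a l ih =>
    simp only [List.foldl_cons, ih, List.mem_cons]
    by_cases hc : c ∈ l
    · simp [hc]
    · by_cases ha : c = a
      · simp [ha, PySem.Dict.getD_insert_self]
      · simp [ha, hc, PySem.Dict.getD_insert]

-- keys of both final dicts are the distinct cues in first-occurrence order
theorem keys_insert_fold {κ ν : Type} [BEq κ] [LawfulBEq κ]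
    (l : List κ) (v : κ → ν) :
    (l.foldl (fun d c => d.insert c (v c)) PySem.Dict.empty).keys = PySem.Set.ofList l := by
  rw [PySem.Dict.keys_foldl_insert, PySem.Dict.keys_empty, PySem.Set.update_nil_left]

theorem set_update_of_subset {κ : Type} [BEq κ] [LawfulBEq κ]
    (s : PySem.Set κ) (l : List κ) (h : ∀ x ∈ l, x ∈ s) : PySem.Set.update s l = s := by
  rw [PySem.Set.update_eq_append_filter]
  have : (PySem.Set.ofList l).filter (fun y => !(PySem.Set.contains s y)) = [] := by
    rw [List.filter_eq_nil_iff]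
    intro a ha
    have : a ∈ s := h a ((PySem.Set.mem_ofList _ _).mp ha)
    simpa using this
  rw [this, List.append_nil]

-- ===== VERDICT (by name: the statement is the Claim_ definition above) =====
theorem compute_cue_segments_spec : Claim_equal_compute_cue_segments := by
  intro tokens margins cues _
  unfold Spec_compute_cue_segments
  simp only [compute_cue_segments, compute_cue_segments_alt]
  rw [PySem.List.enumerate_eq_map_pyRange tokens "", List.foldl_map]
  have hlen : PySem.List.len tokens = (tokens.length : Int) := by simp [PySem.List.len]
  rw [hlen]
  rw [PySem.List.foldl_congr_mem _ _
      (fun st j => (pvEvent tokens margins cues (pvNextEnds tokens 0) (tokens.length : Int) j).elim st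
        (pvUpd st)) _
      (fun acc x hx => by
        rcases PySem.List.mem_pyRange_one.mp hx with ⟨hx0, hx1⟩
        exact pvStep_eq_event tokens margins cues acc x hx0 (by exact_mod_cast hx1))]
  rw [foldl_elim_filterMap _ _ pvUpd]
  unfold pvUpd
  set events := (PySem.List.pyRange 0 (tokens.length : Int) 1).filterMap
      (pvEvent tokens margins cues (pvNextEnds tokens 0) (tokens.length : Int)) with hevents
  have hev : ∀ p ∈ events, p.1 ∈ cues := by
    intro p hp
    rw [hevents] at hp
    rcases List.mem_filterMap.mp hp with ⟨i, _, hi⟩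
    exact mem_events_cue tokens margins cues _ _ i p hi
  have hpm : events.foldl
        (fun st (y : String × List Int) => (st.1.modify y.1 [] (· ++ y.2), st.2.modify y.1 0 (· + 1)))
        (cues.foldl (fun d c => d.insert c []) PySem.Dict.empty,
         (cues.foldl (fun d c => d.insert c 0) PySem.Dict.empty : PySem.Dict String Int)) =
      (events.foldl (fun d p => d.modify p.1 [] (· ++ p.2))
         (cues.foldl (fun d c => d.insert c []) PySem.Dict.empty),
       events.foldl (fun d p => d.modify p.1 0 (· + 1))
         (cues.foldl (fun d c => d.insert c 0) PySem.Dict.empty)) :=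
    PySem.List.foldl_prod_mk
      (fun (d : PySem.Dict String (List Int)) (p : String × List Int) => d.modify p.1 [] (· ++ p.2))
      (fun (d : PySem.Dict String Int) (p : String × List Int) => d.modify p.1 0 (· + 1)) events _ _
  rw [hpm]
  have h01 : (cues.foldl (fun d c => d.insert c ([] : List Int)) PySem.Dict.empty).keys =
      PySem.Set.ofList cues := keys_insert_fold cues _
  have h02 : ((cues.foldl (fun d c => d.insert c 0) PySem.Dict.empty : PySem.Dict String Int)).keys =
      PySem.Set.ofList cues := keys_insert_fold cues _
  have hkB1 : (cues.foldl (fun d c => d.insert c ((events.filter (fun e => e.1 == c)).flatMap (·.2)))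
      PySem.Dict.empty).keys = PySem.Set.ofList cues := keys_insert_fold cues _
  have hkB2 : (cues.foldl (fun d c => d.insert c ((events.filter (fun e => e.1 == c)).length : Int))
      PySem.Dict.empty).keys = PySem.Set.ofList cues := keys_insert_fold cues _
  have hsub : ∀ x ∈ events.map Prod.fst, x ∈ PySem.Set.ofList cues := by
    intro x hx
    rcases List.mem_map.mp hx with ⟨p, hp, rfl⟩
    exact (PySem.Set.mem_ofList _ _).mpr (hev p hp)
  have hkeysA1 : (events.foldl (fun d p => d.modify p.1 [] (· ++ p.2))
      (cues.foldl (fun d c => d.insert c []) PySem.Dict.empty)).keys = PySem.Set.ofList cues := by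
    rw [PySem.Dict.keys_foldl_modify_key, h01]
    exact set_update_of_subset _ _ hsub
  have hkeysA2 : (events.foldl (fun d p => d.modify p.1 0 (· + 1))
      (cues.foldl (fun d c => d.insert c 0) PySem.Dict.empty : PySem.Dict String Int)).keys = PySem.Set.ofList cues := by
    rw [PySem.Dict.keys_foldl_modify_key, h02]
    exact set_update_of_subset _ _ hsub
  refine Prod.ext ?_ ?_
  · show (events.foldl (fun d p => d.modify p.1 [] (· ++ p.2))
        (cues.foldl (fun d c => d.insert c []) PySem.Dict.empty)).items =
      (cues.foldl (fun d c => d.insert c ((events.filter (fun e => e.1 == c)).flatMap (·.2))) PySem.Dict.empty).items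
    rw [PySem.Dict.items_eq_map_keys _ (by rw [hkeysA1]; exact PySem.Set.nodup_ofList cues) [],
        PySem.Dict.items_eq_map_keys _ (by rw [hkB1]; exact PySem.Set.nodup_ofList cues) [],
        hkeysA1, hkB1]
    refine List.map_congr_left ?_
    intro c hc
    have hcc : c ∈ cues := (PySem.Set.mem_ofList _ _).mp hc
    have g1 : (events.foldl (fun d p => d.modify p.1 [] (· ++ p.2))
        (cues.foldl (fun d c => d.insert c []) PySem.Dict.empty)).getD c [] =
        (cues.foldl (fun d c => d.insert c []) PySem.Dict.empty).getD c [] ++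
          (events.filter (fun p => p.1 == c)).flatMap (·.2) :=
      getD_foldl_modify_append_list events _ c
    have g0 : (cues.foldl (fun d c => d.insert c ([] : List Int)) PySem.Dict.empty).getD c [] =
        if c ∈ cues then ([] : List Int) else PySem.Dict.empty.getD c [] := getD_foldl_insert_fun cues _ _ c []
    have gB : (cues.foldl (fun d c => d.insert c ((events.filter (fun e => e.1 == c)).flatMap (·.2)))
        PySem.Dict.empty).getD c [] =
        if c ∈ cues then (events.filter (fun e => e.1 == c)).flatMap (·.2)
        else PySem.Dict.empty.getD c [] := getD_foldl_insert_fun cues _ _ c []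
    rw [g1, g0, gB, if_pos hcc, if_pos hcc]
    simp
  · show (events.foldl (fun d p => d.modify p.1 0 (· + 1))
        (cues.foldl (fun d c => d.insert c 0) PySem.Dict.empty)).items =
      (cues.foldl (fun d c => d.insert c ((events.filter (fun e => e.1 == c)).length : Int)) PySem.Dict.empty).items
    rw [PySem.Dict.items_eq_map_keys _ (by rw [hkeysA2]; exact PySem.Set.nodup_ofList cues) 0,
        PySem.Dict.items_eq_map_keys _ (by rw [hkB2]; exact PySem.Set.nodup_ofList cues) 0,
        hkeysA2, hkB2]
    refine List.map_congr_left ?_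
    intro c hc
    have hcc : c ∈ cues := (PySem.Set.mem_ofList _ _).mp hc
    have g1 : (events.foldl (fun d p => d.modify p.1 0 (· + 1))
        (cues.foldl (fun d c => d.insert c 0) PySem.Dict.empty : PySem.Dict String Int)).getD c 0 =
        (cues.foldl (fun d c => d.insert c 0) PySem.Dict.empty : PySem.Dict String Int).getD c 0 +
          ((events.filter (fun p => p.1 == c)).length : Int) :=
      getD_foldl_modify_count events _ c
    have g0 : (cues.foldl (fun d c => d.insert c 0) PySem.Dict.empty : PySem.Dict String Int).getD c 0 =
        if c ∈ cues then (0 : Int) else (PySem.Dict.empty : PySem.Dict String Int).getD c 0 := getD_foldl_insert_fun cues _ _ c 0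
    have gB : (cues.foldl (fun d c => d.insert c ((events.filter (fun e => e.1 == c)).length : Int))
        PySem.Dict.empty).getD c 0 =
        if c ∈ cues then ((events.filter (fun e => e.1 == c)).length : Int)
        else PySem.Dict.empty.getD c 0 := getD_foldl_insert_fun cues _ _ c 0
    rw [g1, g0, gB, if_pos hcc, if_pos hcc]
    simp
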